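-- pv_equiv track=rewrite | github.com/robsideshow/mbta-bustracker | dictmaker.py | makeStopRoutesDict
-- ===== SOURCE A (Python) =====
-- def makeStopRoutesDict(routestopsdict):
--     #inverts the routestopsdict to create a dict of stop_id : [List of routes for that stop]
--     stoproutesdict = dict()
--     for route_id in routestopsdict:
--         for stop_id in routestopsdict[route_id]:
--             if stop_id in stoproutesdict:
--                 stoproutesdict[stop_id].add(route_id)
--             else:
--                 stoproutesdict[stop_id] = set([route_id])
--     for stop_id in stoproutesdict:
--         stoproutesdict[stop_id] = sorted(list(stoproutesdict[stop_id]))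
--     return stoproutesdict
-- ===== SOURCE B (Python) =====
-- def makeStopRoutesDict(routestopsdict):
--     # Different algorithm: no incremental dict building. First list the stops in
--     # first-appearance order, then for each stop scan all routes and collect the
--     # ones whose stop list contains it (sorted set comprehension per stop).
--     stops = dict.fromkeys(s for ss in routestopsdict.values() for s in ss)
--     return {s: sorted({r for r, ss in routestopsdict.items() if s in ss})
--             for s in stops}
-- ===== Notes on version B (the rewrite author's own statement) =====
-- stated objective: alternative
-- what changed: B abandons A's incremental stop->set dict building entirely: it computes the stop key order once by deduplicating the flattened stop lists, then inverts by a per-stop scan of all routes (a sorted set comprehension over routes containing the stop), so no dict is ever updated in place.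
import Mathlib
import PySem

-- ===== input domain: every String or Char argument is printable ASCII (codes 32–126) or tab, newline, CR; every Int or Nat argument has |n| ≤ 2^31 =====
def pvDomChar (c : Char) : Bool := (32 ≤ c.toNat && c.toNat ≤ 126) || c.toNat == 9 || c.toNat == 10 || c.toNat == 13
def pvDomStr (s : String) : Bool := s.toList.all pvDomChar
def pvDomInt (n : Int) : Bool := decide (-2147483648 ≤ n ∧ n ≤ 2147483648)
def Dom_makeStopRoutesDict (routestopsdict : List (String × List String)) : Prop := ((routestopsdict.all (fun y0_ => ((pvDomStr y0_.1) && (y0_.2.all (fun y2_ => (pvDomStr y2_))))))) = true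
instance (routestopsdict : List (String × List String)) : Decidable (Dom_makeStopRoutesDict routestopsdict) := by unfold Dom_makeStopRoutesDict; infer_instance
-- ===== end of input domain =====

-- B inverts the mapping by a different algorithm: it lists the distinct stops once
-- (dedup of the flattened stop lists) and then, per stop, scans all routes for the
-- ones containing it — no dict is built or updated in place; objective: alternative.

-- ===== PORT A =====
def makeStopRoutesDict (routestopsdict : List (String × List String)) : List (String × List String) :=
  -- for route_id in routestopsdict: for stop_id in routestopsdict[route_id]: if/else add vs new set
  -- then: for stop_id in stoproutesdict: stoproutesdict[stop_id] = sorted(list(…))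
  (((PySem.Dict.ofList routestopsdict).items.foldl (fun sd p =>
      p.2.foldl (fun sd stop_id =>
        if sd.contains stop_id then
          sd.modify stop_id PySem.Set.empty (fun v => PySem.Set.add v p.1)
        else
          sd.insert stop_id (PySem.Set.ofList [p.1])) sd)
    (PySem.Dict.empty : PySem.Dict String (PySem.Set String))).items.map
      (fun q => (q.1, PySem.List.sorted q.2 (fun x => x) false)))

-- ===== PORT B =====
def makeStopRoutesDict_alt (routestopsdict : List (String × List String)) : List (String × List String) :=
  -- stops = dict.fromkeys(s for ss in d.values() for s in ss)  →  PySem.List.dedup of the flattened stops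
  -- {s: sorted({r for r, ss in d.items() if s in ss}) for s in stops}
  let items := (PySem.Dict.ofList routestopsdict).items
  let stops := PySem.List.dedup (items.flatMap (fun p => p.2))
  stops.map (fun s =>
    (s, PySem.List.sorted
          (PySem.Set.ofList ((items.filter (fun p => p.2.contains s)).map Prod.fst))
          (fun x => x) false))

-- ===== PRECONDITION & SPEC =====
def Spec_makeStopRoutesDict (routestopsdict : List (String × List String)) (out : List (String × List String)) : Prop := out = makeStopRoutesDict_alt routestopsdict
instance (routestopsdict : List (String × List String)) (out : List (String × List String)) : Decidable (Spec_makeStopRoutesDict routestopsdict out) := by unfold Spec_makeStopRoutesDict; infer_instance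

-- ===== CLAIM (what is proved, stated in full; the proofs are below) =====
def Claim_equal_makeStopRoutesDict : Prop := ∀ (routestopsdict : List (String × List String)), Dom_makeStopRoutesDict routestopsdict → Spec_makeStopRoutesDict routestopsdict (makeStopRoutesDict routestopsdict)

-- ===== LEMMAS AND PROOFS =====

-- Stage 1 (A ↦ list-accumulator dict): A's dict of sets corresponds, via ofList on
-- the values, to the fold that appends the route id to a list per stop.
def pvPhi (q : String × List String) : String × PySem.Set String := (q.1, PySem.Set.ofList q.2)

theorem pv_contains_eq (sd : PySem.Dict String (PySem.Set String))
    (acc : PySem.Dict String (List String)) (h : sd.items = acc.items.map pvPhi) (s : String) :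
    sd.contains s = acc.contains s := by
  simp only [PySem.Dict.contains, h, List.any_map]
  rfl

theorem pv_get?_eq (sd : PySem.Dict String (PySem.Set String))
    (acc : PySem.Dict String (List String)) (h : sd.items = acc.items.map pvPhi) (s : String) :
    sd.get? s = (acc.get? s).map (fun v => PySem.Set.ofList v) := by
  simp only [PySem.Dict.get?, h, List.find?_map]
  have hp : List.find? ((fun p => p.1 == s) ∘ pvPhi) acc.items
      = List.find? (fun p => p.1 == s) acc.items := rfl
  rw [hp, Option.map_map, Option.map_map]
  rfl

theorem pv_ofList_append_singleton (v : List String) (r : String) :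
    PySem.Set.ofList (v ++ [r]) = PySem.Set.add (PySem.Set.ofList v) r := by
  simp [PySem.Set.ofList, List.foldl_append]

theorem pv_insert_items (sd : PySem.Dict String (PySem.Set String))
    (acc : PySem.Dict String (List String)) (h : sd.items = acc.items.map pvPhi)
    (s : String) (v : List String) :
    (sd.insert s (PySem.Set.ofList v)).items = (acc.insert s v).items.map pvPhi := by
  have hc := pv_contains_eq sd acc h s
  by_cases hb : acc.contains s = true
  · simp [PySem.Dict.insert, hc, hb, h, List.map_map]
    intro a b _
    by_cases hq : a = s <;> simp [pvPhi, hq]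
  · simp only [PySem.Dict.insert, hc, hb]
    simp [h, pvPhi]

theorem pv_step (sd : PySem.Dict String (PySem.Set String))
    (acc : PySem.Dict String (List String)) (h : sd.items = acc.items.map pvPhi)
    (s r : String) :
    (if sd.contains s then sd.modify s PySem.Set.empty (fun v => PySem.Set.add v r)
     else sd.insert s (PySem.Set.ofList [r])).items
    = (acc.modify s [] (fun v => v ++ [r])).items.map pvPhi := by
  have hc := pv_contains_eq sd acc h s
  by_cases hb : acc.contains s = true
  · obtain ⟨v, hv⟩ : ∃ v, acc.get? s = some v := by
      have := PySem.Dict.contains_eq_isSome_get? (d := acc) (k := s)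
      rw [hb] at this
      exact Option.isSome_iff_exists.mp this.symm
    have h1 : sd.get? s = some (PySem.Set.ofList v) := by
      rw [pv_get?_eq sd acc h, hv]; rfl
    rw [hc, if_pos hb]
    simp only [PySem.Dict.modify, PySem.Dict.getD, hv, h1, Option.getD_some]
    rw [← pv_ofList_append_singleton]
    exact pv_insert_items sd acc h s (v ++ [r])
  · have hb' : acc.contains s = false := by simpa using hb
    have hn : acc.get? s = none := by
      have hi := PySem.Dict.contains_eq_isSome_get? (d := acc) (k := s)
      rw [hb'] at hi
      cases hq : acc.get? s with
      | none => rfl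
      | some w => rw [hq] at hi; simp at hi
    rw [hc, if_neg (by simp [hb'])]
    simp only [PySem.Dict.modify, PySem.Dict.getD, hn, Option.getD_none, List.nil_append]
    exact pv_insert_items sd acc h s [r]

theorem pv_inner (stops : List String) (r : String)
    (sd : PySem.Dict String (PySem.Set String)) (acc : PySem.Dict String (List String))
    (h : sd.items = acc.items.map pvPhi) :
    (stops.foldl (fun sd stop_id =>
        if sd.contains stop_id then sd.modify stop_id PySem.Set.empty (fun v => PySem.Set.add v r)
        else sd.insert stop_id (PySem.Set.ofList [r])) sd).items
    = (stops.foldl (fun acc stop_id => acc.modify stop_id [] (fun v => v ++ [r])) acc).items.map pvPhi := by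
  induction stops generalizing sd acc with
  | nil => exact h
  | cons s t ih =>
    simp only [List.foldl_cons]
    exact ih _ _ (pv_step sd acc h s r)

theorem pv_outer (l : List (String × List String))
    (sd : PySem.Dict String (PySem.Set String)) (acc : PySem.Dict String (List String))
    (h : sd.items = acc.items.map pvPhi) :
    (l.foldl (fun sd p =>
        p.2.foldl (fun sd stop_id =>
          if sd.contains stop_id then sd.modify stop_id PySem.Set.empty (fun v => PySem.Set.add v p.1)
          else sd.insert stop_id (PySem.Set.ofList [p.1])) sd) sd).items
    = (l.foldl (fun acc p =>
        p.2.foldl (fun acc stop_id => acc.modify stop_id [] (fun v => v ++ [p.1])) acc) acc).items.map pvPhi := by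
  induction l generalizing sd acc with
  | nil => exact h
  | cons p t ih =>
    simp only [List.foldl_cons]
    exact ih _ _ (pv_inner p.2 p.1 sd acc h)

-- Stage 2 (list-accumulator dict ↦ B's per-stop scan): flatten the nested fold into
-- a single fold over (stop, route) pairs, then characterise its keys and values.
def pvPairs (l : List (String × List String)) : List (String × String) :=
  l.flatMap (fun p => p.2.map (fun s => (s, p.1)))

theorem pv_flatten (l : List (String × List String)) (d : PySem.Dict String (List String)) :
    (l.foldl (fun acc p =>
        p.2.foldl (fun acc stop_id => acc.modify stop_id [] (fun v => v ++ [p.1])) acc) d)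
    = (pvPairs l).foldl (fun d q => d.modify q.1 [] (fun v => v ++ [q.2])) d := by
  induction l generalizing d with
  | nil => rfl
  | cons p t ih =>
    simp only [List.foldl_cons, pvPairs, List.flatMap_cons, List.foldl_append, List.foldl_map]
    simp only [pvPairs] at ih
    exact ih _

theorem pv_foldl_add_const (k : List String) (r : String) (v : PySem.Set String) :
    (k.map (fun _ => r)).foldl PySem.Set.add v = if k = [] then v else PySem.Set.add v r := by
  induction k generalizing v with
  | nil => rfl
  | cons a t ih =>
    simp only [List.map_cons, List.foldl_cons, ih, reduceCtorEq, if_false]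
    by_cases ht : t = [] <;> simp [ht]

theorem pv_values (l : List (String × List String)) (s : String) :
    PySem.Set.ofList (((pvPairs l).filter (fun q => q.1 == s)).map (fun q => q.2))
    = PySem.Set.ofList ((l.filter (fun p => p.2.contains s)).map Prod.fst) := by
  induction l using List.reverseRecOn with
  | nil => rfl
  | append_singleton t p ih =>
    have hpair : pvPairs (t ++ [p]) = pvPairs t ++ p.2.map (fun s => (s, p.1)) := by
      simp [pvPairs]
    have hfp : ((p.2.map (fun s => (s, p.1))).filter (fun q => q.1 == s)).map
        (fun q => q.2) = (p.2.filter (fun x => x == s)).map (fun _ => p.1) := by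
      simp [List.filter_map, List.map_map, Function.comp_def]
    rw [hpair, List.filter_append, List.map_append, PySem.Set.ofList_append,
      PySem.Set.update, hfp, pv_foldl_add_const, List.filter_append]
    by_cases hc : p.2.contains s = true
    · have hmem : s ∈ p.2 := by simpa using hc
      have hne : p.2.filter (fun x => x == s) ≠ [] := by
        intro h
        have := List.filter_eq_nil_iff.mp h s hmem
        simp at this
      rw [if_neg hne, ih]
      simp only [List.filter_cons, List.filter_nil, hc, if_true, List.map_append,
        List.map_cons, List.map_nil]
      exact (pv_ofList_append_singleton _ _).symm
    · have hc' : p.2.contains s = false := by simpa using hc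
      have hs : s ∉ p.2 := by simpa using hc
      have he : p.2.filter (fun x => x == s) = [] := by
        apply List.filter_eq_nil_iff.mpr
        intro x hx hb
        have hxs : x = s := by simpa using hb
        exact hs (hxs ▸ hx)
      rw [if_pos he, ih]
      simp [hs]

theorem pv_pairs_fst (l : List (String × List String)) :
    (pvPairs l).map Prod.fst = l.flatMap (fun p => p.2) := by
  simp [pvPairs, List.map_flatMap, List.map_map, Function.comp_def]

-- ===== VERDICT (by name: the statement is the Claim_ definition above) =====
theorem makeStopRoutesDict_spec : Claim_equal_makeStopRoutesDict := by
  intro routestopsdict _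
  show makeStopRoutesDict routestopsdict = makeStopRoutesDict_alt routestopsdict
  unfold makeStopRoutesDict makeStopRoutesDict_alt
  rw [pv_outer ((PySem.Dict.ofList routestopsdict).items) PySem.Dict.empty PySem.Dict.empty rfl,
    pv_flatten]
  set items := (PySem.Dict.ofList routestopsdict).items with hitems
  set F := (pvPairs items).foldl (fun d q => d.modify q.1 [] (fun v => v ++ [q.2]))
    (PySem.Dict.empty : PySem.Dict String (List String)) with hF
  have hkeys : F.keys = PySem.Set.ofList ((pvPairs items).map Prod.fst) := by
    rw [hF, PySem.Dict.keys_foldl_modify_key]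
    rfl
  have hnd : F.keys.Nodup := by
    rw [hF]
    exact PySem.Dict.nodup_keys_foldl_modify_key _ _ _ _ _ PySem.Dict.nodup_keys_empty
  have hval : ∀ s, F.getD s [] = ((pvPairs items).filter (fun q => q.1 == s)).map (fun q => q.2) := by
    intro s
    rw [hF, PySem.Dict.getD_foldl_modify_append]
    simp
  rw [PySem.Dict.items_eq_map_keys F hnd [], hkeys, pv_pairs_fst]
  simp only [PySem.List.dedup_eq_ofList, List.map_map]
  apply List.map_congr_left
  intro s _
  simp only [Function.comp_def, pvPhi, hval s, pv_values]
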